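-- pv_equiv track=rewrite | github.com/ASYquan/master_thesis | arxon-ics/core/validators/tla_verifier.py | run_static_checks
-- ===== SOURCE A (Python) =====
-- def run_static_checks(plan: dict, authorized_targets: list,
--                       allowed_tools: list) -> list:
--     """Fast static checks before invoking TLC (catches obvious violations)."""
--     violations = []
--
--     steps = plan.get("steps", [])
--     if not steps:
--         violations.append("PLAN EMPTY: No steps defined")
--         return violations
--
--     plan_targets = {s.get("target", "") for s in steps} - {""}
--     plan_tools = {s.get("tool", "") for s in steps} - {""}
--
--     # Scope check
--     unauthorized = plan_targets - set(authorized_targets)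
--     if unauthorized:
--         violations.append(f"SCOPE VIOLATION: Unauthorized targets: {unauthorized}")
--
--     # Tool check
--     forbidden_tools = {"rm_rf", "format_disk", "shutdown", "reboot", "dd_write", "fork_bomb"}
--     dangerous = plan_tools & forbidden_tools
--     if dangerous:
--         violations.append(f"FORBIDDEN TOOL: {dangerous}")
--
--     unrecognized = plan_tools - set(allowed_tools) - forbidden_tools
--     if unrecognized:
--         violations.append(f"UNKNOWN TOOL WARNING: {unrecognized} (not in allowed list)")
--
--     # Phase ordering check
--     phases = [s.get("phase", "") for s in steps]
--     valid_order = ["recon", "planning", "exploitation", "reporting"]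
--     phase_indices = [valid_order.index(p) for p in phases if p in valid_order]
--     if phase_indices != sorted(phase_indices):
--         violations.append("PHASE ORDER VIOLATION: Steps are not in valid sequential order")
--
--     # Exploitation without planning
--     has_planning = any(s.get("phase") == "planning" for s in steps)
--     has_exploitation = any(s.get("phase") == "exploitation" for s in steps)
--     if has_exploitation and not has_planning:
--         violations.append("SAFETY VIOLATION: Exploitation steps exist without prior planning phase")
--
--     # Exploit count per target
--     from collections import Counter
--     exploit_targets = [s["target"] for s in steps if s.get("phase") == "exploitation"]
--     for target, count in Counter(exploit_targets).items():
--         if count > 5: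
--             violations.append(f"EXPLOIT BOUND: Target {target} has {count} exploit steps (max 5)")
--
--     return violations
-- ===== SOURCE B (Python) =====
-- def run_static_checks(plan: dict, authorized_targets: list,
--                       allowed_tools: list) -> list:
--     """Single-pass static checks: one loop over the steps gathers every fact
--     (target/tool sets, phase monotonicity, phase flags, per-target exploit
--     counts); the violation messages are emitted afterwards in the same order.
--     Sets are formatted deterministically (sorted), unlike A's hash-ordered
--     f-string; identical whenever the set has at most one element."""
--     steps = plan.get("steps", [])
--     if not steps:
--         return ["PLAN EMPTY: No steps defined"]
--
--     FORBIDDEN = {"rm_rf", "format_disk", "shutdown", "reboot", "dd_write", "fork_bomb"}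
--     ORDER = {"recon": 0, "planning": 1, "exploitation": 2, "reporting": 3}
--
--     targets = set()
--     tools = set()
--     prev = -1
--     ordered = True
--     has_planning = False
--     has_exploitation = False
--     exploit_counts = {}
--
--     for s in steps:
--         t = s.get("target", "")
--         if t:
--             targets.add(t)
--         tool = s.get("tool", "")
--         if tool:
--             tools.add(tool)
--         p = s.get("phase")
--         i = ORDER.get(p)
--         if i is not None:
--             if i < prev:
--                 ordered = False
--             prev = i
--         if p == "planning":
--             has_planning = True
--         if p == "exploitation":
--             has_exploitation = True
--             tgt = s["target"]
--             exploit_counts[tgt] = exploit_counts.get(tgt, 0) + 1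
--
--     def _fmt(s):
--         return "{" + ", ".join(sorted(map(repr, s))) + "}"
--
--     violations = []
--     unauthorized = targets - set(authorized_targets)
--     if unauthorized:
--         violations.append(f"SCOPE VIOLATION: Unauthorized targets: {_fmt(unauthorized)}")
--     dangerous = tools & FORBIDDEN
--     if dangerous:
--         violations.append(f"FORBIDDEN TOOL: {_fmt(dangerous)}")
--     unrecognized = tools - set(allowed_tools) - FORBIDDEN
--     if unrecognized:
--         violations.append(f"UNKNOWN TOOL WARNING: {_fmt(unrecognized)} (not in allowed list)")
--     if not ordered:
--         violations.append("PHASE ORDER VIOLATION: Steps are not in valid sequential order")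
--     if has_exploitation and not has_planning:
--         violations.append("SAFETY VIOLATION: Exploitation steps exist without prior planning phase")
--     for tgt, count in exploit_counts.items():
--         if count > 5:
--             violations.append(f"EXPLOIT BOUND: Target {tgt} has {count} exploit steps (max 5)")
--     return violations
-- ===== Notes on version B (the rewrite author's own statement) =====
-- stated objective: alternative
-- what changed: A makes ~7 independent passes over the steps (two set comprehensions, a phase list plus sort-and-compare, two any() scans, a filtered comprehension plus Counter); B makes ONE loop over the steps that simultaneously builds the target/tool sets, tracks phase monotonicity incrementally with a running previous-index (no sort), sets the planning/exploitation flags, and counts exploitation steps per target in an insertion-ordered dict, then emits the six messages in A's order; …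
-- outside the precondition, e.g. on run_static_checks({'steps': [{'phase': 'exploitation'}]}, [], []): A raises KeyError, B raises KeyError
import Mathlib
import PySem

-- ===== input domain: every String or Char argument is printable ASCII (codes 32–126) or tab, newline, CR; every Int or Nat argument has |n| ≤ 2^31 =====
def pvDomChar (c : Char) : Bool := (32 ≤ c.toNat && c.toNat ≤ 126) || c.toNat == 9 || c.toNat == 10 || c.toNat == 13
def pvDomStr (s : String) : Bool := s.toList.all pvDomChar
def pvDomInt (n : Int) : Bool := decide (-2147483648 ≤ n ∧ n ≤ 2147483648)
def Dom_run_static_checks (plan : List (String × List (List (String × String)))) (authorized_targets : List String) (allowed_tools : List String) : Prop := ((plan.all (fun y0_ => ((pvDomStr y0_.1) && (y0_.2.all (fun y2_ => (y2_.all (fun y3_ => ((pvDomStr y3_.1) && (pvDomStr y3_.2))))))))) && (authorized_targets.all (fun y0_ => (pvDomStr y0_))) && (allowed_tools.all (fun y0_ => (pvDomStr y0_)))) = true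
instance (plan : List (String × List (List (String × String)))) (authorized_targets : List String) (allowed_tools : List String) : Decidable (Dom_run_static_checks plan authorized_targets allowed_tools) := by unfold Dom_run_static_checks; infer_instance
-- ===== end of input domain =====

-- B replaces A's ~7 separate passes over the steps by one loop that gathers every fact
-- (target/tool sets, incremental phase monotonicity instead of sort-and-compare, phase flags,
-- per-target exploitation counts) and then emits the messages in A's order ("alternative");
-- B prints the reported sets sorted (deterministic), equal to A's on the ≤1-element sets Pre_ admits.


-- ===== PORT A =====
-- Python repr of an ASCII string character under quote q (exact on the Dom charset)
def pyReprChar (q : Char) (c : Char) : List Char :=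
  if c = '\\' then ['\\', '\\']
  else if c = q then ['\\', q]
  else if c = Char.ofNat 9 then ['\\', 't']
  else if c = Char.ofNat 10 then ['\\', 'n']
  else if c = Char.ofNat 13 then ['\\', 'r']
  else [c]

-- Python repr(s) for an ASCII string: single quotes unless s contains ' and no "
def pyReprStr (s : String) : String :=
  let cs := s.toList
  let q := if cs.contains '\'' && !(cs.contains '"') then '"' else '\''
  String.ofList (q :: cs.flatMap (pyReprChar q) ++ [q])

-- f"{some_set}" for a NONEMPTY set: exact for the ≤1-element sets Pre_ admits
-- (for ≥2 elements Python's order is hash order, which Pre_ excludes)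
def pySetRepr (s : PySem.Set String) : String :=
  "{" ++ PySem.Str.join ", " (s.map pyReprStr) ++ "}"

def run_static_checks (plan : List (String × List (List (String × String)))) (authorized_targets : List String) (allowed_tools : List String) : List String :=
  let violations : List String := []
  let steps := PySem.Dict.getD (PySem.Dict.mk plan) "steps" []
  if steps.isEmpty then
    violations ++ ["PLAN EMPTY: No steps defined"]
  else
    let plan_targets := PySem.Set.diff (PySem.Set.ofList (steps.map (fun s => PySem.Dict.getD (PySem.Dict.mk s) "target" ""))) (PySem.Set.ofList [""])
    let plan_tools := PySem.Set.diff (PySem.Set.ofList (steps.map (fun s => PySem.Dict.getD (PySem.Dict.mk s) "tool" ""))) (PySem.Set.ofList [""])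
    let unauthorized := PySem.Set.diff plan_targets (PySem.Set.ofList authorized_targets)
    let violations := if !unauthorized.isEmpty then violations ++ ["SCOPE VIOLATION: Unauthorized targets: " ++ pySetRepr unauthorized] else violations
    let forbidden_tools := PySem.Set.ofList ["rm_rf", "format_disk", "shutdown", "reboot", "dd_write", "fork_bomb"]
    let dangerous := PySem.Set.inter plan_tools forbidden_tools
    let violations := if !dangerous.isEmpty then violations ++ ["FORBIDDEN TOOL: " ++ pySetRepr dangerous] else violations
    let unrecognized := PySem.Set.diff (PySem.Set.diff plan_tools (PySem.Set.ofList allowed_tools)) forbidden_tools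
    let violations := if !unrecognized.isEmpty then violations ++ ["UNKNOWN TOOL WARNING: " ++ pySetRepr unrecognized ++ " (not in allowed list)"] else violations
    let phases := steps.map (fun s => PySem.Dict.getD (PySem.Dict.mk s) "phase" "")
    let valid_order := ["recon", "planning", "exploitation", "reporting"]
    let phase_indices : List Int := (phases.filter (fun p => valid_order.contains p)).map (fun p => (((PySem.List.index? valid_order p).getD 0 : Nat) : Int))
    let violations := if phase_indices ≠ PySem.List.sorted phase_indices (fun x => x) false then violations ++ ["PHASE ORDER VIOLATION: Steps are not in valid sequential order"] else violations
    let has_planning := steps.any (fun s => PySem.Dict.get? (PySem.Dict.mk s) "phase" == some "planning")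
    let has_exploitation := steps.any (fun s => PySem.Dict.get? (PySem.Dict.mk s) "phase" == some "exploitation")
    let violations := if has_exploitation && !has_planning then violations ++ ["SAFETY VIOLATION: Exploitation steps exist without prior planning phase"] else violations
    -- s["target"] raises KeyError when the key is absent; Pre_ excludes that, so .getD "" is exact here
    let exploit_targets := (steps.filter (fun s => PySem.Dict.get? (PySem.Dict.mk s) "phase" == some "exploitation")).map (fun s => (PySem.Dict.get? (PySem.Dict.mk s) "target").getD "")
    let violations := (PySem.Dict.counter exploit_targets).items.foldl (fun v p => if p.2 > 5 then v ++ ["EXPLOIT BOUND: Target " ++ p.1 ++ " has " ++ PySem.Int.toStr p.2 ++ " exploit steps (max 5)"] else v) violations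
    violations

-- ===== PORT B =====
structure BState where
  targets : PySem.Set String
  tools : PySem.Set String
  prev : Int
  ordered : Bool
  hasPlanning : Bool
  hasExploitation : Bool
  counts : PySem.Dict String Int
  deriving Repr

-- ORDER = {"recon": 0, "planning": 1, "exploitation": 2, "reporting": 3}
def bOrder : PySem.Dict String Int := PySem.Dict.mk [("recon", 0), ("planning", 1), ("exploitation", 2), ("reporting", 3)]

-- "{" + ", ".join(sorted(map(repr, s))) + "}" — B's deterministic set formatting
def pySetReprSorted (s : PySem.Set String) : String :=
  "{" ++ PySem.Str.join ", " (PySem.List.sorted (s.map pyReprStr) (fun x => x) false) ++ "}"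

-- FORBIDDEN = {...}
def bForbidden : PySem.Set String := PySem.Set.ofList ["rm_rf", "format_disk", "shutdown", "reboot", "dd_write", "fork_bomb"]

-- one iteration of B's single loop (field updates of Source B's loop body; the fields are
-- independent, and the `i < prev` test reads prev before it is overwritten, as in Source B)
def bStep (st : BState) (s : List (String × String)) : BState :=
  let t := PySem.Dict.getD (PySem.Dict.mk s) "target" ""
  let tool := PySem.Dict.getD (PySem.Dict.mk s) "tool" ""
  let p := PySem.Dict.get? (PySem.Dict.mk s) "phase"
  let i? := PySem.Dict.get? bOrder (p.getD "")   -- ORDER.get(p); None has no entry, so .getD "" is exact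
  { targets := if t ≠ "" then PySem.Set.add st.targets t else st.targets,
    tools := if tool ≠ "" then PySem.Set.add st.tools tool else st.tools,
    prev := match i? with | some i => i | none => st.prev,
    ordered := match i? with | some i => if i < st.prev then false else st.ordered | none => st.ordered,
    hasPlanning := if p == some "planning" then true else st.hasPlanning,
    hasExploitation := if p == some "exploitation" then true else st.hasExploitation,
    -- s["target"] raises KeyError when absent; Pre_ excludes that, so .getD "" is exact here
    counts := if p == some "exploitation" then
        st.counts.insert ((PySem.Dict.get? (PySem.Dict.mk s) "target").getD "") (st.counts.getD ((PySem.Dict.get? (PySem.Dict.mk s) "target").getD "") 0 + 1)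
      else st.counts }

def run_static_checks_alt (plan : List (String × List (List (String × String)))) (authorized_targets : List String) (allowed_tools : List String) : List String :=
  let steps := PySem.Dict.getD (PySem.Dict.mk plan) "steps" []
  if steps.isEmpty then
    ["PLAN EMPTY: No steps defined"]
  else
    let st := steps.foldl bStep ⟨PySem.Set.empty, PySem.Set.empty, -1, true, false, false, PySem.Dict.empty⟩
    let violations : List String := []
    let unauthorized := PySem.Set.diff st.targets (PySem.Set.ofList authorized_targets)
    let violations := if !unauthorized.isEmpty then violations ++ ["SCOPE VIOLATION: Unauthorized targets: " ++ pySetReprSorted unauthorized] else violations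
    let dangerous := PySem.Set.inter st.tools bForbidden
    let violations := if !dangerous.isEmpty then violations ++ ["FORBIDDEN TOOL: " ++ pySetReprSorted dangerous] else violations
    let unrecognized := PySem.Set.diff (PySem.Set.diff st.tools (PySem.Set.ofList allowed_tools)) bForbidden
    let violations := if !unrecognized.isEmpty then violations ++ ["UNKNOWN TOOL WARNING: " ++ pySetReprSorted unrecognized ++ " (not in allowed list)"] else violations
    let violations := if !st.ordered then violations ++ ["PHASE ORDER VIOLATION: Steps are not in valid sequential order"] else violations
    let violations := if st.hasExploitation && !st.hasPlanning then violations ++ ["SAFETY VIOLATION: Exploitation steps exist without prior planning phase"] else violations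
    st.counts.items.foldl (fun v p => if p.2 > 5 then v ++ ["EXPLOIT BOUND: Target " ++ p.1 ++ " has " ++ PySem.Int.toStr p.2 ++ " exploit steps (max 5)"] else v) violations

-- ===== PRECONDITION & SPEC =====
-- Pre_ excludes (i) plans with an exploitation step lacking a "target" key (A raises KeyError there,
-- and so does B), and (ii) inputs where any of the three reported sets (unauthorized targets,
-- dangerous tools, unrecognized tools) has ≥ 2 elements: A's f-string prints the set, whose element
-- order is Python's hash order — an accidental, hash-seed-dependent value no port can pin down
-- (B formats those sets sorted instead, which coincides with A on ≤1-element sets).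
def Pre_run_static_checks (plan : List (String × List (List (String × String)))) (authorized_targets : List String) (allowed_tools : List String) : Prop :=
  let steps := PySem.Dict.getD (PySem.Dict.mk plan) "steps" []
  let forb : List String := ["rm_rf", "format_disk", "shutdown", "reboot", "dd_write", "fork_bomb"]
  let tgts := (steps.map (fun s => PySem.Dict.getD (PySem.Dict.mk s) "target" "")).filter (fun t => t ≠ "" && !authorized_targets.contains t)
  let tls := (steps.map (fun s => PySem.Dict.getD (PySem.Dict.mk s) "tool" "")).filter (fun t => t ≠ "")
  (∀ s ∈ steps, PySem.Dict.get? (PySem.Dict.mk s) "phase" = some "exploitation" → PySem.Dict.contains (PySem.Dict.mk s) "target" = true)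
  ∧ (PySem.List.dedup tgts).length ≤ 1
  ∧ (PySem.List.dedup (tls.filter (fun t => forb.contains t))).length ≤ 1
  ∧ (PySem.List.dedup (tls.filter (fun t => !forb.contains t && !allowed_tools.contains t))).length ≤ 1

instance (plan : List (String × List (List (String × String)))) (authorized_targets : List String) (allowed_tools : List String) : Decidable (Pre_run_static_checks plan authorized_targets allowed_tools) := by unfold Pre_run_static_checks; infer_instance

def pvWitness_run_static_checks : (List (String × List (List (String × String)))) × List String × List String :=
  ([("steps", [[("target", "h1"), ("tool", "nmap"), ("phase", "recon")], [("target", "h2"), ("tool", "hydra"), ("phase", "exploitation")]])], ["h1"], ["nmap"])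

def Spec_run_static_checks (plan : List (String × List (List (String × String)))) (authorized_targets : List String) (allowed_tools : List String) (out : List String) : Prop := out = run_static_checks_alt plan authorized_targets allowed_tools
instance (plan : List (String × List (List (String × String)))) (authorized_targets : List String) (allowed_tools : List String) (out : List String) : Decidable (Spec_run_static_checks plan authorized_targets allowed_tools out) := by unfold Spec_run_static_checks; infer_instance

-- ===== CLAIM (what is proved, stated in full; the proofs are below) =====
def Claim_equal_run_static_checks : Prop := ∀ (plan : List (String × List (List (String × String)))) (authorized_targets : List String) (allowed_tools : List String), Dom_run_static_checks plan authorized_targets allowed_tools → Pre_run_static_checks plan authorized_targets allowed_tools → Spec_run_static_checks plan authorized_targets allowed_tools (run_static_checks plan authorized_targets allowed_tools)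


-- ===== LEMMAS AND PROOFS =====

-- the per-step phase index B looks up (ORDER.get(p))
def bIdx? (s : List (String × String)) : Option Int :=
  PySem.Dict.get? bOrder ((PySem.Dict.get? (PySem.Dict.mk s) "phase").getD "")

-- the monotonicity accumulator of B's loop, isolated
def bMono : Int → Bool → List Int → Bool
  | _, b, [] => b
  | p, b, i :: r => bMono i (if i < p then false else b) r

lemma bMono_eq (xs : List Int) : ∀ (p : Int) (b : Bool),
    bMono p b xs = (b && decide (List.IsChain (· ≤ ·) (p :: xs))) := by
  induction xs with
  | nil => intro p b; simp [bMono]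
  | cons i r ih =>
    intro p b
    rw [bMono, ih]
    by_cases h : i < p
    · simp [h, List.isChain_cons_cons, show ¬ p ≤ i by omega]
    · simp [h, List.isChain_cons_cons, show p ≤ i by omega]

lemma bIdx?_cases (s : List (String × String)) :
    bIdx? s = none ∨ bIdx? s = some 0 ∨ bIdx? s = some 1 ∨ bIdx? s = some 2 ∨ bIdx? s = some 3 := by
  unfold bIdx? bOrder
  generalize ((PySem.Dict.get? (PySem.Dict.mk s) "phase").getD "") = p
  simp [PySem.Dict.get?, List.find?]
  split <;> simp_all
  split <;> simp_all
  split <;> simp_all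
  split <;> simp_all

-- one unfolding of B's loop, field by field
lemma bFold (steps : List (List (String × String))) : ∀ (init : BState),
    steps.foldl bStep init =
      ⟨ ((steps.map (fun s => PySem.Dict.getD (PySem.Dict.mk s) "target" "")).filter (fun t => t ≠ "")).foldl PySem.Set.add init.targets,
        ((steps.map (fun s => PySem.Dict.getD (PySem.Dict.mk s) "tool" "")).filter (fun t => t ≠ "")).foldl PySem.Set.add init.tools,
        (steps.filterMap bIdx?).foldl (fun _ i => i) init.prev,
        bMono init.prev init.ordered (steps.filterMap bIdx?),
        init.hasPlanning || steps.any (fun s => PySem.Dict.get? (PySem.Dict.mk s) "phase" == some "planning"),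
        init.hasExploitation || steps.any (fun s => PySem.Dict.get? (PySem.Dict.mk s) "phase" == some "exploitation"),
        ((steps.filter (fun s => PySem.Dict.get? (PySem.Dict.mk s) "phase" == some "exploitation")).map (fun s => (PySem.Dict.get? (PySem.Dict.mk s) "target").getD "")).foldl (fun d x => d.insert x (d.getD x 0 + 1)) init.counts ⟩ := by
  induction steps with
  | nil => intro init; cases init; simp [bMono]
  | cons s rest ih =>
    intro init
    rw [List.foldl_cons, ih]
    have hstep : bStep init s =
        ⟨ if PySem.Dict.getD (PySem.Dict.mk s) "target" "" ≠ "" then PySem.Set.add init.targets (PySem.Dict.getD (PySem.Dict.mk s) "target" "") else init.targets,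
          if PySem.Dict.getD (PySem.Dict.mk s) "tool" "" ≠ "" then PySem.Set.add init.tools (PySem.Dict.getD (PySem.Dict.mk s) "tool" "") else init.tools,
          match bIdx? s with | some i => i | none => init.prev,
          match bIdx? s with | some i => if i < init.prev then false else init.ordered | none => init.ordered,
          if PySem.Dict.get? (PySem.Dict.mk s) "phase" == some "planning" then true else init.hasPlanning,
          if PySem.Dict.get? (PySem.Dict.mk s) "phase" == some "exploitation" then true else init.hasExploitation,
          if PySem.Dict.get? (PySem.Dict.mk s) "phase" == some "exploitation" then
            init.counts.insert ((PySem.Dict.get? (PySem.Dict.mk s) "target").getD "") (init.counts.getD ((PySem.Dict.get? (PySem.Dict.mk s) "target").getD "") 0 + 1)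
          else init.counts ⟩ := rfl
    rw [hstep]
    by_cases ht : PySem.Dict.getD (PySem.Dict.mk s) "target" "" ≠ "" <;>
    by_cases htl : PySem.Dict.getD (PySem.Dict.mk s) "tool" "" ≠ "" <;>
    by_cases hpl : PySem.Dict.get? (PySem.Dict.mk s) "phase" == some "planning" <;>
    by_cases hex : PySem.Dict.get? (PySem.Dict.mk s) "phase" == some "exploitation" <;>
    rcases hI : bIdx? s with _ | i <;>
      simp [ht, htl, hpl, hex, hI, bMono, List.map_cons, List.any_cons, List.foldl_cons]



-- filtering commutes with building a Python set (first-occurrence dedup)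
lemma filter_set_add (q : String → Bool) (s : PySem.Set String) (x : String) :
    List.filter q (PySem.Set.add s x) = if q x then PySem.Set.add (List.filter q s) x else List.filter q s := by
  by_cases hq : q x <;> by_cases hc : x ∈ s <;>
    simp [PySem.Set.add, PySem.Set.contains, List.filter_append, hq, hc, List.mem_filter]

lemma filter_ofList (q : String → Bool) (l : List String) :
    List.filter q (PySem.Set.ofList l) = PySem.Set.ofList (l.filter q) := by
  have key : ∀ (l : List String) (acc : PySem.Set String),
      List.filter q (l.foldl PySem.Set.add acc) = (l.filter q).foldl PySem.Set.add (List.filter q acc) := by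
    intro l
    induction l with
    | nil => intro acc; simp
    | cons x r ih =>
      intro acc
      rw [List.foldl_cons, ih, List.filter_cons]
      by_cases hq : q x <;> simp [hq, filter_set_add]
  exact key l PySem.Set.empty

-- sorting a ≤1-element list is the identity, so B's sorted formatting agrees with A's
lemma repr_sorted_len_le_one (s : PySem.Set String) (h : s.length ≤ 1) :
    pySetReprSorted s = pySetRepr s := by
  match s with
  | [] => rfl
  | [x] => rfl
  | x :: y :: t => simp at h

-- the three reported sets, written as Pre_'s deduplicated filter lists
lemma unauth_eq (steps : List (List (String × String))) (auth : List String) :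
    PySem.Set.diff
      (List.foldl PySem.Set.add PySem.Set.empty
        ((steps.map (fun s => PySem.Dict.getD (PySem.Dict.mk s) "target" "")).filter (fun t => t ≠ "")))
      (PySem.Set.ofList auth)
      = PySem.List.dedup ((steps.map (fun s => PySem.Dict.getD (PySem.Dict.mk s) "target" "")).filter
          (fun t => t ≠ "" && !auth.contains t)) := by
  show List.filter _ (PySem.Set.ofList _) = _
  rw [filter_ofList, List.filter_filter, PySem.List.dedup_eq_ofList]
  congr 1
  apply List.filter_congr
  intro x _
  simp [Bool.and_comm]

lemma dang_eq (steps : List (List (String × String))) :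
    PySem.Set.inter
      (List.foldl PySem.Set.add PySem.Set.empty
        ((steps.map (fun s => PySem.Dict.getD (PySem.Dict.mk s) "tool" "")).filter (fun t => t ≠ "")))
      (PySem.Set.ofList ["rm_rf", "format_disk", "shutdown", "reboot", "dd_write", "fork_bomb"])
      = PySem.List.dedup (((steps.map (fun s => PySem.Dict.getD (PySem.Dict.mk s) "tool" "")).filter (fun t => t ≠ "")).filter
          (fun t => (["rm_rf", "format_disk", "shutdown", "reboot", "dd_write", "fork_bomb"] : List String).contains t)) := by
  show List.filter _ (PySem.Set.ofList _) = _
  rw [filter_ofList, PySem.List.dedup_eq_ofList]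
  congr 1

lemma unrec_eq (steps : List (List (String × String))) (allowed : List String) :
    PySem.Set.diff
      (PySem.Set.diff
        (List.foldl PySem.Set.add PySem.Set.empty
          ((steps.map (fun s => PySem.Dict.getD (PySem.Dict.mk s) "tool" "")).filter (fun t => t ≠ "")))
        (PySem.Set.ofList allowed))
      (PySem.Set.ofList ["rm_rf", "format_disk", "shutdown", "reboot", "dd_write", "fork_bomb"])
      = PySem.List.dedup (((steps.map (fun s => PySem.Dict.getD (PySem.Dict.mk s) "tool" "")).filter (fun t => t ≠ "")).filter
          (fun t => !(["rm_rf", "format_disk", "shutdown", "reboot", "dd_write", "fork_bomb"] : List String).contains t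
                    && !allowed.contains t)) := by
  show List.filter _ (List.filter _ (PySem.Set.ofList _)) = _
  rw [filter_ofList, filter_ofList, List.filter_filter, PySem.List.dedup_eq_ofList]
  congr 1
  apply List.filter_congr
  intro x _
  simp [Bool.and_comm]

-- B's dict lookup of a phase index agrees with A's contains/index computation
lemma phaseIdx (p : String) :
    PySem.Dict.get? bOrder p =
      if (["recon", "planning", "exploitation", "reporting"] : List String).contains p then
        some (((PySem.List.index? ["recon", "planning", "exploitation", "reporting"] p).getD 0 : Nat) : Int)
      else none := by
  by_cases h1 : p = "recon"
  · subst h1; rfl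
  · by_cases h2 : p = "planning"
    · subst h2; rfl
    · by_cases h3 : p = "exploitation"
      · subst h3; rfl
      · by_cases h4 : p = "reporting"
        · subst h4; rfl
        · have e1 : ("recon" == p) = false := by simp [Ne.symm h1]
          have e2 : ("planning" == p) = false := by simp [Ne.symm h2]
          have e3 : ("exploitation" == p) = false := by simp [Ne.symm h3]
          have e4 : ("reporting" == p) = false := by simp [Ne.symm h4]
          simp [bOrder, PySem.Dict.get?, List.find?, h1, h2, h3, h4, e1, e2, e3, e4]

lemma filterMap_if {α β : Type} (g : α → String) (q : String → Bool) (f : String → β) (l : List α) :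
    l.filterMap (fun a => if q (g a) then some (f (g a)) else none) = ((l.map g).filter q).map f := by
  induction l with
  | nil => rfl
  | cons a r ih => by_cases hq : q (g a) <;> simp [hq, ih]

lemma sorted_self_iff (xs : List Int) :
    (PySem.List.sorted xs (fun x => x) false = xs) ↔ List.IsChain (· ≤ ·) xs := by
  constructor
  · intro h
    have hp := PySem.List.sorted_pairwise (xs := xs) (key := fun x => x)
    rw [h] at hp
    exact hp.isChain
  · intro h
    have hp : List.Pairwise (fun (a b : Int) => a ≤ b) xs := List.isChain_iff_pairwise.mp h
    exact PySem.List.sorted_eq_self_of_pairwise xs (fun x => x) hp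

lemma idxs_nonneg (steps : List (List (String × String))) :
    ∀ x ∈ steps.filterMap bIdx?, (0 : Int) ≤ x := by
  intro x hx
  rcases List.mem_filterMap.mp hx with ⟨s, _, hs⟩
  rcases bIdx?_cases s with h | h | h | h | h <;> rw [h] at hs <;> simp_all <;> omega

lemma chain_neg1 (xs : List Int) (h : ∀ x ∈ xs, (0 : Int) ≤ x) :
    List.IsChain (· ≤ ·) ((-1 : Int) :: xs) ↔ List.IsChain (· ≤ ·) xs := by
  rw [List.isChain_cons]
  constructor
  · exact fun hc => hc.2
  · intro hc
    refine ⟨?_, hc⟩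
    intro y hy
    have := h y (List.mem_of_mem_head? hy)
    omega


-- A's "set minus {''}" is B's filtered set-build
lemma diff_empty_str (L : List String) :
    PySem.Set.diff (PySem.Set.ofList L) (PySem.Set.ofList [""]) =
      (L.filter (fun t => t ≠ "")).foldl PySem.Set.add PySem.Set.empty := by
  have h1 : PySem.Set.diff (PySem.Set.ofList L) (PySem.Set.ofList [""]) =
      List.filter (fun t => t ≠ "") (PySem.Set.ofList L) := by
    apply List.filter_congr
    intro x _
    simp [PySem.Set.ofList, PySem.Set.add, PySem.Set.empty, PySem.Set.contains]
  rw [h1, filter_ofList]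
  rfl

-- A's phase-index list is B's filterMap over the steps
lemma idxs_eq (steps : List (List (String × String))) :
    steps.filterMap bIdx? =
      ((steps.map (fun s => PySem.Dict.getD (PySem.Dict.mk s) "phase" "")).filter
        (fun p => (["recon", "planning", "exploitation", "reporting"] : List String).contains p)).map
        (fun p => (((PySem.List.index? ["recon", "planning", "exploitation", "reporting"] p).getD 0 : Nat) : Int)) := by
  unfold bIdx?
  rw [show (fun s : List (String × String) => PySem.Dict.get? bOrder ((PySem.Dict.get? (PySem.Dict.mk s) "phase").getD "")) =
        (fun s : List (String × String) => PySem.Dict.get? bOrder (PySem.Dict.getD (PySem.Dict.mk s) "phase" "")) from rfl]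
  rw [List.filterMap_congr
    (g := fun s =>
      if (["recon", "planning", "exploitation", "reporting"] : List String).contains (PySem.Dict.getD (PySem.Dict.mk s) "phase" "") then
        some (((PySem.List.index? ["recon", "planning", "exploitation", "reporting"] (PySem.Dict.getD (PySem.Dict.mk s) "phase" "")).getD 0 : Nat) : Int)
      else none)
    (fun s _ => phaseIdx (PySem.Dict.getD (PySem.Dict.mk s) "phase" ""))]
  exact filterMap_if (fun s => PySem.Dict.getD (PySem.Dict.mk s) "phase" "")
    (fun p => (["recon", "planning", "exploitation", "reporting"] : List String).contains p)
    (fun p => (((PySem.List.index? ["recon", "planning", "exploitation", "reporting"] p).getD 0 : Nat) : Int)) steps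

-- A's sort-and-compare test is B's incremental monotonicity flag
lemma ord_iff (steps : List (List (String × String))) :
    (steps.filterMap bIdx? ≠ PySem.List.sorted (steps.filterMap bIdx?) (fun x => x) false) ↔
      ((!bMono (-1) true (steps.filterMap bIdx?)) = true) := by
  rw [bMono_eq]
  have h1 := chain_neg1 _ (idxs_nonneg steps)
  have h2 : (steps.filterMap bIdx? = PySem.List.sorted (steps.filterMap bIdx?) (fun x => x) false) ↔
      List.IsChain (· ≤ ·) (steps.filterMap bIdx?) :=
    ⟨fun h => (sorted_self_iff _).mp h.symm, fun h => ((sorted_self_iff _).mpr h).symm⟩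
  simp [h1, h2]

-- the same fact, phrased on A's map/filter form of the index list (the form the main goal shows)
lemma ord_iff' (steps : List (List (String × String))) :
    ((!bMono (-1) true
        (((steps.map (fun s => PySem.Dict.getD (PySem.Dict.mk s) "phase" "")).filter
            (fun p => (["recon", "planning", "exploitation", "reporting"] : List String).contains p)).map
            (fun p => (((PySem.List.index? ["recon", "planning", "exploitation", "reporting"] p).getD 0 : Nat) : Int)))) = true) ↔
      (((steps.map (fun s => PySem.Dict.getD (PySem.Dict.mk s) "phase" "")).filter
          (fun p => (["recon", "planning", "exploitation", "reporting"] : List String).contains p)).map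
          (fun p => (((PySem.List.index? ["recon", "planning", "exploitation", "reporting"] p).getD 0 : Nat) : Int)) ≠
        PySem.List.sorted
          (((steps.map (fun s => PySem.Dict.getD (PySem.Dict.mk s) "phase" "")).filter
            (fun p => (["recon", "planning", "exploitation", "reporting"] : List String).contains p)).map
            (fun p => (((PySem.List.index? ["recon", "planning", "exploitation", "reporting"] p).getD 0 : Nat) : Int)))
          (fun x => x) false) := by
  rw [← idxs_eq]
  exact (ord_iff steps).symm

-- ===== VERDICT (by name: the statement is the Claim_ definition above) =====
theorem run_static_checks_spec : Claim_equal_run_static_checks := by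
  intro plan authorized_targets allowed_tools _ hpre
  obtain ⟨-, h1, h2, h3⟩ := hpre
  have r1 : pySetReprSorted
      (PySem.Set.diff
        (List.foldl PySem.Set.add PySem.Set.empty
          (((PySem.Dict.getD (PySem.Dict.mk plan) "steps" []).map (fun s => PySem.Dict.getD (PySem.Dict.mk s) "target" "")).filter (fun t => t ≠ "")))
        (PySem.Set.ofList authorized_targets)) = pySetRepr
      (PySem.Set.diff
        (List.foldl PySem.Set.add PySem.Set.empty
          (((PySem.Dict.getD (PySem.Dict.mk plan) "steps" []).map (fun s => PySem.Dict.getD (PySem.Dict.mk s) "target" "")).filter (fun t => t ≠ "")))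
        (PySem.Set.ofList authorized_targets)) := by
    apply repr_sorted_len_le_one
    rw [unauth_eq]
    exact h1
  have r2 : pySetReprSorted
      (PySem.Set.inter
        (List.foldl PySem.Set.add PySem.Set.empty
          (((PySem.Dict.getD (PySem.Dict.mk plan) "steps" []).map (fun s => PySem.Dict.getD (PySem.Dict.mk s) "tool" "")).filter (fun t => t ≠ "")))
        (PySem.Set.ofList ["rm_rf", "format_disk", "shutdown", "reboot", "dd_write", "fork_bomb"])) = pySetRepr
      (PySem.Set.inter
        (List.foldl PySem.Set.add PySem.Set.empty
          (((PySem.Dict.getD (PySem.Dict.mk plan) "steps" []).map (fun s => PySem.Dict.getD (PySem.Dict.mk s) "tool" "")).filter (fun t => t ≠ "")))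
        (PySem.Set.ofList ["rm_rf", "format_disk", "shutdown", "reboot", "dd_write", "fork_bomb"])) := by
    apply repr_sorted_len_le_one
    rw [dang_eq]
    exact h2
  have r3 : pySetReprSorted
      (PySem.Set.diff
        (PySem.Set.diff
          (List.foldl PySem.Set.add PySem.Set.empty
            (((PySem.Dict.getD (PySem.Dict.mk plan) "steps" []).map (fun s => PySem.Dict.getD (PySem.Dict.mk s) "tool" "")).filter (fun t => t ≠ "")))
          (PySem.Set.ofList allowed_tools))
        (PySem.Set.ofList ["rm_rf", "format_disk", "shutdown", "reboot", "dd_write", "fork_bomb"])) = pySetRepr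
      (PySem.Set.diff
        (PySem.Set.diff
          (List.foldl PySem.Set.add PySem.Set.empty
            (((PySem.Dict.getD (PySem.Dict.mk plan) "steps" []).map (fun s => PySem.Dict.getD (PySem.Dict.mk s) "tool" "")).filter (fun t => t ≠ "")))
          (PySem.Set.ofList allowed_tools))
        (PySem.Set.ofList ["rm_rf", "format_disk", "shutdown", "reboot", "dd_write", "fork_bomb"])) := by
    apply repr_sorted_len_le_one
    rw [unrec_eq]
    exact h3
  unfold Spec_run_static_checks run_static_checks run_static_checks_alt
  by_cases hemp : (PySem.Dict.getD (PySem.Dict.mk plan) "steps" ([] : List (List (String × String)))).isEmpty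
  · simp [hemp]
  · simp only [hemp, Bool.false_eq_true, if_false, List.nil_append, bFold,
      diff_empty_str, Bool.false_or, PySem.Dict.foldl_insert_getD_add_one_eq_counter,
      idxs_eq, ord_iff', bForbidden, r1, r2, r3]
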